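-- pv_equiv track=rewrite | github.com/williamwarlick/RepoLine | agent/src/provider_stream/common.py | _normalize_whitespace_with_end_indexes
-- ===== SOURCE A (Python) =====
-- def _normalize_whitespace_with_end_indexes(text: str) -> tuple[str, list[int]]:
--     normalized_chars: list[str] = []
--     raw_end_indexes: list[int] = []
--     saw_non_whitespace = False
--     pending_space = False
--
--     for index, char in enumerate(text):
--         if char.isspace():
--             if saw_non_whitespace:
--                 pending_space = True
--             continue
--
--         if pending_space and normalized_chars:
--             normalized_chars.append(" ")
--             raw_end_indexes.append(index)
--             pending_space = False
--
--         normalized_chars.append(char)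
--         raw_end_indexes.append(index + 1)
--         saw_non_whitespace = True
--
--     return "".join(normalized_chars), raw_end_indexes
-- ===== SOURCE B (Python) =====
-- def _normalize_whitespace_with_end_indexes(text: str) -> tuple[str, list[int]]:
--     # Pass 1: collect maximal non-whitespace spans (start, end).
--     spans = []
--     i, n = 0, len(text)
--     while i < n:
--         if text[i].isspace():
--             i += 1
--         else:
--             j = i + 1
--             while j < n and not text[j].isspace():
--                 j += 1
--             spans.append((i, j))
--             i = j
--     # Pass 2: rebuild normalized text + raw end indexes from the span table.
--     parts = []
--     ends = []
--     for k, (s, e) in enumerate(spans):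
--         if k:
--             parts.append(" ")
--             ends.append(s)
--         parts.append(text[s:e])
--         ends.extend(range(s + 1, e + 1))
--     return "".join(parts), ends
-- ===== Notes on version B (the rewrite author's own statement) =====
-- stated objective: alternative
-- what changed: Replaces A's single-pass pending_space/saw_non_whitespace state machine with two passes: first collect maximal non-whitespace word spans (start, end), then rebuild the normalized string and raw end-index list from the span table.
import Mathlib
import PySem

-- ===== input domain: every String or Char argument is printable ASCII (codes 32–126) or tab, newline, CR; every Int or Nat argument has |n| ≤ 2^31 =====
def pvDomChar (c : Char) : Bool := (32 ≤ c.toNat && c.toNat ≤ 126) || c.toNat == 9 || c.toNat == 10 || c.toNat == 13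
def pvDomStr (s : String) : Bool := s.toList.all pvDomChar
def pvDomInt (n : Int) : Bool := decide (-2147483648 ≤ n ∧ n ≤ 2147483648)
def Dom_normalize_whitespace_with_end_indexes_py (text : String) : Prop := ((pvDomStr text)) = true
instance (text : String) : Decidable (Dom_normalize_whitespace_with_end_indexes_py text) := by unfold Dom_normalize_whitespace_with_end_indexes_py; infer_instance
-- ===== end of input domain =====

-- B replaces A's pending-space state machine with a span table + reconstruction pass (alternative decomposition, same cost).

-- ===== PORT A =====
-- A's 'for index, char in enumerate(text)' loop, step for step:
-- state = (saw_non_whitespace, pending_space, normalized_chars, raw_end_indexes).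
def pvALoop (l : List Char) (i : Nat) (saw pending : Bool)
    (acc : List Char) (ends : List Int) : List Char × List Int :=
  match l with
  | [] => (acc, ends)
  | c :: rest =>
    if PySem.Chars.isspace c then
      pvALoop rest (i + 1) saw (if saw then true else pending) acc ends
    else if pending && !acc.isEmpty then
      pvALoop rest (i + 1) true false ((acc ++ [' ']) ++ [c]) ((ends ++ [(i : Int)]) ++ [(i : Int) + 1])
    else
      pvALoop rest (i + 1) true pending (acc ++ [c]) (ends ++ [(i : Int) + 1])

def normalize_whitespace_with_end_indexes_py (text : String) : String × List Int :=
  let r := pvALoop text.toList 0 false false [] []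
  (String.ofList r.1, r.2)

-- ===== PORT B =====
-- B's pass 1: the outer while-loop collecting maximal non-whitespace spans (start, end);
-- the inner 'while j < n and not text[j].isspace()' is the takeWhile run over the rest.
def pvSpans (l : List Char) (i : Nat) : List (Nat × Nat) :=
  match l with
  | [] => []
  | c :: rest =>
    if PySem.Chars.isspace c then pvSpans rest (i + 1)
    else
      let run := rest.takeWhile (fun x => !PySem.Chars.isspace x)
      (i, i + 1 + run.length) :: pvSpans (rest.drop run.length) (i + 1 + run.length)
termination_by l.length
decreasing_by
· simp only [List.length_cons]; omega
· rw [List.length_drop, List.length_cons]; omega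

-- B's pass 2: the 'for k, (s, e) in enumerate(spans)' reconstruction loop
-- ('first' tracks k = 0; text[s:e] is the drop/take slice; range(s+1, e+1) the end indexes).
def pvRebuild (tl : List Char) (spans : List (Nat × Nat)) (first : Bool) : List Char × List Int :=
  match spans with
  | [] => ([], [])
  | (s, e) :: rest =>
    let w := (tl.drop s).take (e - s)
    let es := (List.range' (s + 1) (e - s)).map (fun p => Int.ofNat p)
    let r := pvRebuild tl rest false
    if first then (w ++ r.1, es ++ r.2)
    else (' ' :: (w ++ r.1), (s : Int) :: (es ++ r.2))

def normalize_whitespace_with_end_indexes_py_alt (text : String) : String × List Int :=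
  let tl := text.toList
  let r := pvRebuild tl (pvSpans tl 0) true
  (String.ofList r.1, r.2)

-- ===== PRECONDITION & SPEC =====
def Spec_normalize_whitespace_with_end_indexes_py (text : String) (out : String × List Int) : Prop := out = normalize_whitespace_with_end_indexes_py_alt text
instance (text : String) (out : String × List Int) : Decidable (Spec_normalize_whitespace_with_end_indexes_py text out) := by unfold Spec_normalize_whitespace_with_end_indexes_py; infer_instance

-- ===== CLAIM (what is proved, stated in full; the proofs are below) =====
def Claim_equal_normalize_whitespace_with_end_indexes_py : Prop := ∀ (text : String), Dom_normalize_whitespace_with_end_indexes_py text → Spec_normalize_whitespace_with_end_indexes_py text (normalize_whitespace_with_end_indexes_py text)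

-- ===== LEMMAS AND PROOFS =====

-- take / drop of a takeWhile-length prefix
lemma pv_take_takeWhile (p : Char → Bool) : ∀ (l : List Char), l.take (l.takeWhile p).length = l.takeWhile p := by
  intro l
  induction l with
  | nil => simp
  | cons c rest ih =>
    by_cases h : p c <;> simp [h, ih]

lemma pv_drop_takeWhile (p : Char → Bool) : ∀ (l : List Char), l.drop (l.takeWhile p).length = l.dropWhile p := by
  intro l
  induction l with
  | nil => simp
  | cons c rest ih =>
    by_cases h : p c <;> simp [h, ih]

lemma pv_dropWhile_head (p : Char → Bool) : ∀ (l : List Char) (x : Char) (xs : List Char),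
    l.dropWhile p = x :: xs → p x = false := by
  intro l
  induction l with
  | nil => intro x xs h; simp at h
  | cons c rest ih =>
    intro x xs h
    by_cases hc : p c
    · exact ih x xs (by simpa [hc] using h)
    · simp [hc] at h
      simp [← h.1, hc]

-- processing a whole run of non-whitespace characters through A's loop
lemma pv_run_step : ∀ (w : List Char), (∀ c ∈ w, PySem.Chars.isspace c = false) →
    ∀ (rest : List Char) (i : Nat) (acc : List Char) (ends : List Int),
    pvALoop (w ++ rest) i true false acc ends
      = pvALoop rest (i + w.length) true false (acc ++ w)
          (ends ++ (List.range' (i + 1) w.length).map (fun p => Int.ofNat p)) := by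
  intro w
  induction w with
  | nil => intro _ rest i acc ends; simp
  | cons c w ih =>
    intro hw rest i acc ends
    have hc : PySem.Chars.isspace c = false := hw c (by simp)
    have hw' : ∀ c' ∈ w, PySem.Chars.isspace c' = false := fun c' h => hw c' (by simp [h])
    rw [List.cons_append]
    rw [show pvALoop (c :: (w ++ rest)) i true false acc ends
        = pvALoop (w ++ rest) (i + 1) true false (acc ++ [c]) (ends ++ [(i : Int) + 1]) from by
      simp [pvALoop, hc]]
    rw [ih hw' rest (i + 1) (acc ++ [c]) (ends ++ [(i : Int) + 1])]
    rw [List.length_cons, List.range'_succ, List.map_cons]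
    congr 1
    · omega
    · simp
    · simp

-- main invariant: A's loop from any reachable state equals B's span reconstruction
lemma pvMain : ∀ (n : Nat) (l tl : List Char) (i : Nat) (acc : List Char) (ends : List Int) (pending : Bool),
    l.length ≤ n → tl.drop i = l →
    (pending = true → acc ≠ []) →
    (∀ c l', l = c :: l' → PySem.Chars.isspace c = false → acc ≠ [] → pending = true) →
    pvALoop l i (!acc.isEmpty) pending acc ends =
      (acc ++ (pvRebuild tl (pvSpans l i) acc.isEmpty).1,
       ends ++ (pvRebuild tl (pvSpans l i) acc.isEmpty).2) := by
  intro n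
  induction n with
  | zero =>
    intro l tl i acc ends pending hn _ _ _
    have hl : l = [] := by cases l with | nil => rfl | cons => simp at hn
    subst hl
    simp [pvALoop, pvSpans, pvRebuild]
  | succ n ih =>
    intro l tl i acc ends pending hn hdrop hinv1 hinv2
    match l with
    | [] => simp [pvALoop, pvSpans, pvRebuild]
    | c :: l' =>
      have hn' : l'.length ≤ n := by simp only [List.length_cons] at hn; omega
      have hdrop' : tl.drop (i + 1) = l' := by
        rw [← List.drop_drop, hdrop, List.drop_one, List.tail_cons]
      by_cases hsp : PySem.Chars.isspace c
      · -- whitespace: skip the char, maybe set pending_space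
        rw [show pvALoop (c :: l') i (!acc.isEmpty) pending acc ends
            = pvALoop l' (i + 1) (!acc.isEmpty) (if !acc.isEmpty then true else pending) acc ends from by
          simp [pvALoop, hsp]]
        rw [show pvSpans (c :: l') i = pvSpans l' (i + 1) from by simp [pvSpans, hsp]]
        by_cases hacc : acc = []
        · subst hacc
          have hpend : pending = false := by
            cases pending with
            | false => rfl
            | true => exact absurd (hinv1 rfl) (by simp)
          subst hpend
          exact ih l' tl (i + 1) [] ends false hn' hdrop' (by simp) (by simp)
        · have hne : acc.isEmpty = false := by simpa using hacc
          rw [show (if !acc.isEmpty then true else pending) = true from by simp [hne]]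
          exact ih l' tl (i + 1) acc ends true hn' hdrop' (fun _ => hacc) (fun _ _ _ _ _ => rfl)
      · -- non-whitespace: a maximal word run starts here
        have hspf : PySem.Chars.isspace c = false := by simpa using hsp
        have hrunmem : ∀ c' ∈ l'.takeWhile (fun x => !PySem.Chars.isspace x),
            PySem.Chars.isspace c' = false := by
          intro c' hc'
          simpa using List.mem_takeWhile_imp hc'
        have hsplit : l' = l'.takeWhile (fun x => !PySem.Chars.isspace x)
            ++ l'.drop (l'.takeWhile (fun x => !PySem.Chars.isspace x)).length := by
          conv_lhs => rw [← List.take_append_drop (l'.takeWhile (fun x => !PySem.Chars.isspace x)).length l']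
          rw [pv_take_takeWhile]
        have hdroptail : ∀ c2 l2,
            l'.drop (l'.takeWhile (fun x => !PySem.Chars.isspace x)).length = c2 :: l2 →
            PySem.Chars.isspace c2 = true := by
          intro c2 l2 h
          rw [pv_drop_takeWhile] at h
          have := pv_dropWhile_head (fun x => !PySem.Chars.isspace x) l' c2 l2 h
          simpa using this
        set k : Nat := (l'.takeWhile (fun x => !PySem.Chars.isspace x)).length with hk
        have hdrop'' : tl.drop (i + 1 + k) = l'.drop k := by
          rw [← List.drop_drop, hdrop']
        have hw : (tl.drop i).take (i + 1 + k - i) = c :: l'.takeWhile (fun x => !PySem.Chars.isspace x) := by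
          rw [hdrop, show i + 1 + k - i = k + 1 from by omega, List.take_succ_cons, hk,
            pv_take_takeWhile]
        have hlen : (l'.drop k).length ≤ n := by
          rw [List.length_drop]; omega
        have hspans : pvSpans (c :: l') i
            = (i, i + 1 + k) :: pvSpans (l'.drop k) (i + 1 + k) := by
          rw [pvSpans, if_neg hsp]
        have hrange : List.range' (i + 1) (i + 1 + k - i) = (i + 1) :: List.range' (i + 1 + 1) k := by
          rw [show i + 1 + k - i = k + 1 from by omega, List.range'_succ]
        rw [hspans, pvRebuild]
        by_cases hacc : acc = []
        · -- first word: no separator space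
          subst hacc
          have hpend : pending = false := by
            cases pending with
            | false => rfl
            | true => exact absurd (hinv1 rfl) (by simp)
          subst hpend
          rw [show pvALoop (c :: l') i (!(List.isEmpty [])) false [] ends
              = pvALoop l' (i + 1) true false [c] (ends ++ [(i : Int) + 1]) from by
            simp [pvALoop, hspf]]
          conv_lhs => rw [hsplit]
          rw [pv_run_step _ hrunmem (l'.drop k) (i + 1) [c] (ends ++ [(i : Int) + 1]), ← hk]
          rw [show (true : Bool) = (!(([c] ++ l'.takeWhile (fun x => !PySem.Chars.isspace x)).isEmpty)) from by simp]
          rw [ih (l'.drop k) tl (i + 1 + k) ([c] ++ l'.takeWhile (fun x => !PySem.Chars.isspace x))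
              ((ends ++ [(i : Int) + 1]) ++ (List.range' (i + 1 + 1) k).map (fun p => Int.ofNat p))
              false hlen hdrop'' (by simp)
              (fun c2 l2 h hc2 _ => absurd (hdroptail c2 l2 h) (by simp [hc2]))]
          simp [hw, hrange, List.append_assoc]
        · -- later word: pending is set, emit the separator space first
          have hpend : pending = true := hinv2 c l' rfl hspf hacc
          subst hpend
          have hne : acc.isEmpty = false := by simpa using hacc
          rw [show pvALoop (c :: l') i (!acc.isEmpty) true acc ends
              = pvALoop l' (i + 1) true false ((acc ++ [' ']) ++ [c])
                  ((ends ++ [(i : Int)]) ++ [(i : Int) + 1]) from by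
            simp [pvALoop, hspf, hne]]
          conv_lhs => rw [hsplit]
          rw [pv_run_step _ hrunmem (l'.drop k) (i + 1) ((acc ++ [' ']) ++ [c])
              ((ends ++ [(i : Int)]) ++ [(i : Int) + 1]), ← hk]
          rw [show (true : Bool) = (!((((acc ++ [' ']) ++ [c]) ++ l'.takeWhile (fun x => !PySem.Chars.isspace x)).isEmpty)) from by simp]
          rw [ih (l'.drop k) tl (i + 1 + k)
              (((acc ++ [' ']) ++ [c]) ++ l'.takeWhile (fun x => !PySem.Chars.isspace x))
              ((((ends ++ [(i : Int)]) ++ [(i : Int) + 1])) ++ (List.range' (i + 1 + 1) k).map (fun p => Int.ofNat p))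
              false hlen hdrop'' (by simp)
              (fun c2 l2 h hc2 _ => absurd (hdroptail c2 l2 h) (by simp [hc2]))]
          have h9 : (acc ++ ' ' :: c :: List.takeWhile (fun x => !PySem.Chars.isspace x) l').isEmpty = false := by
            cases acc <;> simp
          simp [hne, hw, hrange, h9, List.append_assoc]

-- ===== VERDICT (by name: the statement is the Claim_ definition above) =====
theorem normalize_whitespace_with_end_indexes_py_spec : Claim_equal_normalize_whitespace_with_end_indexes_py := by
  intro text _
  unfold Spec_normalize_whitespace_with_end_indexes_py
  unfold normalize_whitespace_with_end_indexes_py normalize_whitespace_with_end_indexes_py_alt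
  have h := pvMain text.toList.length text.toList text.toList 0 [] [] false
    (le_refl _) (by simp) (by simp) (by intro _ _ _ _ h; exact absurd rfl h)
  simp only [List.isEmpty_nil, Bool.not_true] at h
  rw [h]
  simp
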